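-- pv_equiv track=rewrite | github.com/UCSD-ECE140/ece-140b-spring-2023-final-project-driverbuddy | Server_code/app/src/utils/driving_scorer.py | detect_hard_accelerations
-- ===== SOURCE A (Python) =====
-- def detect_hard_accelerations(longitudinal_acceleration_data):
--     # Initialize variables
--     hard_accel_count = 0
--     is_hard_accelerating = False
--     acceleration_threshold = 200 # change later
--
--     # Iterate over the acceleration data
--     for i in range(1, len(longitudinal_acceleration_data)):
--         current_acc = longitudinal_acceleration_data[i]
--         previous_acc = longitudinal_acceleration_data[i - 1]
--
--         acceleration = current_acc - previous_acc
--
--         if acceleration > acceleration_threshold: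
--             if not is_hard_accelerating:
--                 is_hard_accelerating = True
--                 hard_accel_count += 1
--         else:
--             is_hard_accelerating = False
--
--     return hard_accel_count
-- ===== SOURCE B (Python) =====
-- def detect_hard_accelerations(longitudinal_acceleration_data):
--     # Stateless counting formula (inclusion-exclusion on maximal runs):
--     # a burst is a maximal run of consecutive deltas > 200, and the number of
--     # maximal runs of True in a boolean sequence equals
--     #   (#True) - (#adjacent True-True pairs).
--     deltas = [b - a for a, b in
--               zip(longitudinal_acceleration_data, longitudinal_acceleration_data[1:])]
--     hard = sum(d > 200 for d in deltas)
--     joined = sum(d1 > 200 and d2 > 200 for d1, d2 in zip(deltas, deltas[1:]))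
--     return hard - joined
-- ===== Notes on version B (the rewrite author's own statement) =====
-- stated objective: alternative
-- what changed: Replaces A's sequential state machine (is_hard_accelerating flag updated index by index) with a stateless closed formula: bursts = (#deltas > 200) - (#adjacent delta pairs both > 200), computed as two independent sums by inclusion-exclusion on maximal runs.
import Mathlib
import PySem

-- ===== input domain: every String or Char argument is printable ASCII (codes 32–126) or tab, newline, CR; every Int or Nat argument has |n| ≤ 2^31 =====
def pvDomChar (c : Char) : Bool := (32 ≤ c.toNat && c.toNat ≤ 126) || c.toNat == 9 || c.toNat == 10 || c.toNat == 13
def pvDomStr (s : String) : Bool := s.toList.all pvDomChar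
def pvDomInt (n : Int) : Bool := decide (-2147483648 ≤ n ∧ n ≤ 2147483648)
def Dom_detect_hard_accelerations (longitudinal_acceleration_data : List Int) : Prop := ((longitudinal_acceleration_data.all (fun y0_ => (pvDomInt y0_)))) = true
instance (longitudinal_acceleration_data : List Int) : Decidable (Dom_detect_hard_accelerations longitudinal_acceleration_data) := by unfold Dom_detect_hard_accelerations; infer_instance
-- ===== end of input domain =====

-- B replaces A's sequential state machine by a stateless inclusion-exclusion formula; return values proved equal on all inputs.

-- ===== PORT A =====
-- A: single pass over indices 1..n-1 with a (count, is_hard_accelerating) state machine.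
def detect_hard_accelerations (longitudinal_acceleration_data : List Int) : Int :=
  ((PySem.List.pyRange 1 (longitudinal_acceleration_data.length : Int) 1).foldl
    (fun (st : Int × Bool) i =>
      let current_acc := PySem.List.pyGetD longitudinal_acceleration_data i 0
      let previous_acc := PySem.List.pyGetD longitudinal_acceleration_data (i - 1) 0
      let acceleration := current_acc - previous_acc
      if acceleration > 200 then
        (if st.2 = false then (st.1 + 1, true) else st)
      else (st.1, false))
    ((0 : Int), false)).1

-- ===== PORT B =====
-- B: deltas list, then bursts = (#deltas > 200) - (#adjacent delta pairs both > 200).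
def detect_hard_accelerations_alt (longitudinal_acceleration_data : List Int) : Int :=
  let deltas := (longitudinal_acceleration_data.zip (longitudinal_acceleration_data.drop 1)).map
    (fun p => p.2 - p.1)
  let hard := ((deltas.map (fun d => decide (d > 200))).count true : Int)
  let joined := (((deltas.zip (deltas.drop 1)).map
    (fun p => decide (p.1 > 200) && decide (p.2 > 200))).count true : Int)
  hard - joined

-- ===== PRECONDITION & SPEC =====
def Spec_detect_hard_accelerations (longitudinal_acceleration_data : List Int) (out : Int) : Prop := out = detect_hard_accelerations_alt longitudinal_acceleration_data
instance (longitudinal_acceleration_data : List Int) (out : Int) : Decidable (Spec_detect_hard_accelerations longitudinal_acceleration_data out) := by unfold Spec_detect_hard_accelerations; infer_instance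

-- ===== CLAIM (what is proved, stated in full; the proofs are below) =====
def Claim_equal_detect_hard_accelerations : Prop := ∀ (longitudinal_acceleration_data : List Int), Dom_detect_hard_accelerations longitudinal_acceleration_data → Spec_detect_hard_accelerations longitudinal_acceleration_data (detect_hard_accelerations longitudinal_acceleration_data)

-- ===== LEMMAS AND PROOFS =====

-- Rising-edge step over a flag (used only to characterise A's fold).
def pvStepB (st : Int × Bool) (f : Bool) : Int × Bool :=
  (if f && !st.2 then st.1 + 1 else st.1, f)

-- A's branch, applied at a pair, is exactly pvStepB at the pair's flag.
lemma pvStepA_eq_stepB (st : Int × Bool) (cur prev : Int) :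
    (if cur - prev > 200 then (if st.2 = false then (st.1 + 1, true) else st) else (st.1, false))
      = pvStepB st (decide (cur - prev > 200)) := by
  obtain ⟨c, fl⟩ := st
  by_cases h : cur - prev > 200
  · cases fl <;> simp [pvStepB, h]
  · cases fl <;> simp [pvStepB, h]

-- Index-driven fold over the cons list equals the fold over the zipped flag list.
lemma pvAux : ∀ (xs : List Int) (a : Int) (st : Int × Bool),
    (List.range xs.length).foldl
      (fun st k => pvStepB st (decide ((a :: xs).getD (k + 1) 0 - (a :: xs).getD k 0 > 200))) st
    = (((a :: xs).zip xs).map (fun p => decide (p.2 - p.1 > 200))).foldl pvStepB st := by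
  intro xs
  induction xs with
  | nil => intro a st; simp
  | cons b ys ih =>
    intro a st
    rw [show (b :: ys).length = ys.length + 1 from rfl, List.range_succ_eq_map]
    simp only [List.foldl_cons, List.foldl_map, List.zip_cons_cons, List.map_cons]
    have ih' := ih b (pvStepB st (decide (b - a > 200)))
    rw [List.foldl_map] at ih'
    exact ih'

-- Number of adjacent True-True pairs in a flag list.
def pvAdjTT : List Bool → Int
  | a :: b :: t => (if a && b then 1 else 0) + pvAdjTT (b :: t)
  | _ => 0

-- The fold's count is the stateless formula: #True − #adjacent TT − a correction for the incoming state.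
lemma pvFold_eq_formula : ∀ (fs : List Bool) (c : Int) (p : Bool),
    (fs.foldl pvStepB (c, p)).1
      = c + (fs.count true : Int) - pvAdjTT fs - (if p && fs.headD false then 1 else 0) := by
  intro fs
  induction fs with
  | nil => intro c p; simp [pvAdjTT]
  | cons f t ih =>
    intro c p
    simp only [List.foldl_cons]
    rw [show pvStepB (c, p) f = ((if f && !p then c + 1 else c), f) from rfl]
    rw [ih]
    cases t with
    | nil => cases f <;> cases p <;> simp [pvAdjTT]
    | cons g u =>
      cases f <;> cases p <;> cases g <;>
        simp [pvAdjTT, List.count_cons] <;> ring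

-- pvAdjTT of the flag list equals B's joined count.
lemma pvAdjTT_eq_joined : ∀ (ds : List Int),
    pvAdjTT (ds.map (fun d => decide (d > 200)))
      = ((((ds.map (fun d => decide (d > 200))).zip ((ds.map (fun d => decide (d > 200))).drop 1)).map
          (fun p => p.1 && p.2)).count true : Int) := by
  intro ds
  induction ds with
  | nil => simp [pvAdjTT]
  | cons a t ih =>
    cases t with
    | nil => simp [pvAdjTT]
    | cons b u =>
      simp only [List.map_cons, List.drop_one, List.tail_cons, List.zip_cons_cons] at ih ⊢
      rw [show pvAdjTT (decide (a > 200) :: decide (b > 200) :: u.map (fun d => decide (d > 200)))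
            = (if decide (a > 200) && decide (b > 200) then 1 else 0)
              + pvAdjTT (decide (b > 200) :: u.map (fun d => decide (d > 200))) from rfl]
      rw [ih]
      by_cases h : (decide (a > 200) && decide (b > 200)) = true <;>
        simp [h] <;> ring

-- Pushing the flag map through zip: B's joined count equals the TT-pair count on flags.
lemma pvJoined_eq (ds : List Int) :
    (((ds.map (fun d => decide (d > 200))).zip ((ds.map (fun d => decide (d > 200))).drop 1)).map
        (fun p => p.1 && p.2)).count true
      = ((ds.zip (ds.drop 1)).map
        (fun p => decide (p.1 > 200) && decide (p.2 > 200))).count true := by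
  rw [← List.map_drop, List.zip_map, List.map_map]
  congr 1

-- ===== VERDICT (by name: the statement is the Claim_ definition above) =====
theorem detect_hard_accelerations_spec : Claim_equal_detect_hard_accelerations := by
  intro xs _
  unfold Spec_detect_hard_accelerations detect_hard_accelerations detect_hard_accelerations_alt
  cases xs with
  | nil => simp [PySem.List.pyRange_one_eq_nil]
  | cons a ys =>
    have hlen : ((a :: ys).length : Int) - 1 = (ys.length : Int) := by simp
    rw [PySem.List.pyRange_one]
    simp only [List.foldl_map, hlen, Int.toNat_natCast, List.drop_one, List.tail_cons]
    have hstep : ∀ (st : Int × Bool) (k : Nat),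
        (fun (st : Int × Bool) (i : Int) =>
          let current_acc := PySem.List.pyGetD (a :: ys) i 0
          let previous_acc := PySem.List.pyGetD (a :: ys) (i - 1) 0
          let acceleration := current_acc - previous_acc
          if acceleration > 200 then
            (if st.2 = false then (st.1 + 1, true) else st)
          else (st.1, false)) st (1 + (k : Int))
        = pvStepB st (decide ((a :: ys).getD (k + 1) 0 - (a :: ys).getD k 0 > 200)) := by
      intro st k
      have h1 : (1 : Int) + (k : Int) = ((k + 1 : Nat) : Int) := by push_cast; ring
      simp only [h1]
      rw [show ((k + 1 : Nat) : Int) - 1 = ((k : Nat) : Int) by omega]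
      simp only [PySem.List.pyGetD_natCast]
      exact pvStepA_eq_stepB st _ _
    have hA : ((List.range ys.length).foldl
          (fun (st : Int × Bool) (k : Nat) =>
            (fun (st : Int × Bool) (i : Int) =>
              let current_acc := PySem.List.pyGetD (a :: ys) i 0
              let previous_acc := PySem.List.pyGetD (a :: ys) (i - 1) 0
              let acceleration := current_acc - previous_acc
              if acceleration > 200 then
                (if st.2 = false then (st.1 + 1, true) else st)
              else (st.1, false)) st (1 + (k : Int))) ((0 : Int), false)).1
        = ((((a :: ys).zip ys).map (fun p => decide (p.2 - p.1 > 200))).foldl pvStepB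
            ((0 : Int), false)).1 := by
      rw [← pvAux]
      congr 1
      apply List.foldl_ext
      intro st k _
      exact hstep st k
    rw [hA, pvFold_eq_formula]
    have hflags : ((a :: ys).zip ys).map (fun p => decide (p.2 - p.1 > 200))
        = (((a :: ys).zip ys).map (fun p => p.2 - p.1)).map (fun d => decide (d > 200)) := by
      simp only [List.map_map]; rfl
    rw [hflags, pvAdjTT_eq_joined, pvJoined_eq]
    simp only [Bool.false_and, ← List.drop_one]
    norm_num
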